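-- pv_equiv track=rewrite | github.com/yokolet/tranquil-beach-python | tranquil-beach/arrays_strings/string_transformation.py | canConvert
-- ===== SOURCE A (Python) =====
-- def canConvert(str1: str, str2: str) -> bool:
--     if str1 == str2: return True
--     if len(set(str2)) == 26: return False
--     pair = {}
--     for c1, c2 in zip(str1, str2):
--         if c1 not in pair:
--             pair[c1] = c2
--         elif pair[c1] != c2:
--             return False
--     return True
-- ===== SOURCE B (Python) =====
-- def canConvert(str1: str, str2: str) -> bool:
--     if str1 == str2: return True
--     if len(set(str2)) == 26: return False
--     ps = sorted(zip(str1, str2))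
--     return all(p[1] == q[1] for p, q in zip(ps, ps[1:]) if p[0] == q[0])
-- ===== Notes on version B (the rewrite author's own statement) =====
-- stated objective: alternative
-- what changed: Replaces A's incremental dict with early conflict exit by sort-then-scan: sort the zipped (source,target) pairs lexicographically and check that adjacent pairs with equal source characters have equal targets (equal sources are contiguous after sorting, so this decides functionality of the mapping).
import Mathlib
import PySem

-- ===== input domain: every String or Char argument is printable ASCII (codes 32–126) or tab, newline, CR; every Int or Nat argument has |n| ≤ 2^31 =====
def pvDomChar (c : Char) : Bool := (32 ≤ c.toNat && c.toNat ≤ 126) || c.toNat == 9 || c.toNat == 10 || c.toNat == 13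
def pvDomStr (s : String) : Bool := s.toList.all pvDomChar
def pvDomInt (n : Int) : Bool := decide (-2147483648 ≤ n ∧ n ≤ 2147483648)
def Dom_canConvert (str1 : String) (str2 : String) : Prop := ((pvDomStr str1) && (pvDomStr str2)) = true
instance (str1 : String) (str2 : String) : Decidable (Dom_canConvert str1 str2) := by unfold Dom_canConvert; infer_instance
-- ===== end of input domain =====

-- B replaces A's incremental dict with early conflict exit by sort-then-scan:
-- sort the zipped pairs and check adjacent pairs with equal source chars have equal targets
-- (alternative algorithm; same result, O(n log n) instead of O(n)).

-- ===== PORT A =====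
-- the 'for c1, c2 in zip(str1, str2)' loop with the dict 'pair'
def canConvertLoop : List (Char × Char) → PySem.Dict Char Char → Bool
  | [], _ => true
  | (c1, c2) :: rest, pair =>
    match pair.get? c1 with
    | none => canConvertLoop rest (pair.insert c1 c2)      -- c1 not in pair
    | some v => if v != c2 then false else canConvertLoop rest pair

def canConvert (str1 : String) (str2 : String) : Bool :=
  if str1 == str2 then true
  else if PySem.Set.len (PySem.Set.ofList str2.toList) == 26 then false
  else canConvertLoop (str1.toList.zip str2.toList) PySem.Dict.empty

-- ===== PORT B =====
-- sort key encoding Python's lexicographic order on (Char, Char) tuples;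
-- exact for the domain's chars (codes < 128), under which the equivalence is stated
def pvEnc (p : Char × Char) : Nat := p.1.toNat * 128 + p.2.toNat

def canConvert_alt (str1 : String) (str2 : String) : Bool :=
  if str1 == str2 then true
  else if PySem.Set.len (PySem.Set.ofList str2.toList) == 26 then false
  else
    let ps := PySem.List.sorted (str1.toList.zip str2.toList) pvEnc false
    -- all(p[1] == q[1] for p, q in zip(ps, ps[1:]) if p[0] == q[0])
    (ps.zip (PySem.List.slice ps (some 1) none)).all
      (fun pq => pq.1.1 != pq.2.1 || pq.1.2 == pq.2.2)

-- ===== PRECONDITION & SPEC =====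
def Spec_canConvert (str1 : String) (str2 : String) (out : Bool) : Prop := out = canConvert_alt str1 str2
instance (str1 : String) (str2 : String) (out : Bool) : Decidable (Spec_canConvert str1 str2 out) := by unfold Spec_canConvert; infer_instance

-- ===== CLAIM (what is proved, stated in full; the proofs are below) =====
def Claim_equal_canConvert : Prop := ∀ (str1 : String) (str2 : String), Dom_canConvert str1 str2 → Spec_canConvert str1 str2 (canConvert str1 str2)

-- ===== LEMMAS AND PROOFS =====

-- the property both tails decide: the zipped pairs form a (partial) function
def PairsFunctional (L : List (Char × Char)) : Prop :=
  ∀ p ∈ L, ∀ q ∈ L, p.1 = q.1 → p.2 = q.2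

theorem canConvertLoop_eq_true_iff (L : List (Char × Char)) (d : PySem.Dict Char Char) :
    canConvertLoop L d = true ↔
      (PairsFunctional L ∧ ∀ p ∈ L, ∀ v, d.get? p.1 = some v → p.2 = v) := by
  induction L generalizing d with
  | nil =>
    simp [canConvertLoop, PairsFunctional]
  | cons hd rest ih =>
    obtain ⟨c1, c2⟩ := hd
    cases hget : d.get? c1 with
    | none =>
      have hred : canConvertLoop ((c1, c2) :: rest) d = canConvertLoop rest (d.insert c1 c2) := by
        simp [canConvertLoop, hget]
      rw [hred, ih]
      constructor
      · rintro ⟨hf, hc⟩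
        refine ⟨?_, ?_⟩
        · intro p hp q hq hpq
          rcases List.mem_cons.mp hp with rfl | hp <;> rcases List.mem_cons.mp hq with rfl | hq
          · rfl
          · have := hc q hq c2
            refine (this ?_).symm
            have h1 : (d.insert c1 c2).get? c1 = some c2 := PySem.Dict.get?_insert_self d c1 c2
            rw [← hpq]; exact h1
          · have := hc p hp c2
            refine this ?_
            have h1 : (d.insert c1 c2).get? c1 = some c2 := PySem.Dict.get?_insert_self d c1 c2
            rw [hpq]; exact h1
          · exact hf p hp q hq hpq
        · intro p hp v hv
          rcases List.mem_cons.mp hp with rfl | hp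
          · rw [hget] at hv; cases hv
          · by_cases he : p.1 = c1
            · rw [he, hget] at hv; cases hv
            · rw [← PySem.Dict.get?_insert_of_ne d c2 he] at hv
              exact hc p hp v hv
      · rintro ⟨hf, hc⟩
        refine ⟨?_, ?_⟩
        · intro p hp q hq hpq
          exact hf p (List.mem_cons_of_mem _ hp) q (List.mem_cons_of_mem _ hq) hpq
        · intro p hp v hv
          by_cases he : p.1 = c1
          · have h2 : (d.insert c1 c2).get? p.1 = some c2 := by
              rw [he]; exact PySem.Dict.get?_insert_self d c1 c2
            rw [h2] at hv
            cases hv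
            exact hf p (List.mem_cons_of_mem _ hp) (c1, c2) List.mem_cons_self he
          · rw [PySem.Dict.get?_insert_of_ne d c2 he] at hv
            exact hc p (List.mem_cons_of_mem _ hp) v hv
    | some v =>
      by_cases hvc : v = c2
      · have hred : canConvertLoop ((c1, c2) :: rest) d = canConvertLoop rest d := by
          simp [canConvertLoop, hget, hvc]
        have hget2 : d.get? c1 = some c2 := by rw [hget, hvc]
        rw [hred, ih]
        constructor
        · rintro ⟨hf, hc⟩
          refine ⟨?_, ?_⟩
          · intro p hp q hq hpq
            rcases List.mem_cons.mp hp with rfl | hp <;> rcases List.mem_cons.mp hq with rfl | hq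
            · rfl
            · refine (hc q hq c2 ?_).symm
              rw [← hpq]; exact hget2
            · refine hc p hp c2 ?_
              rw [hpq]; exact hget2
            · exact hf p hp q hq hpq
          · intro p hp v' hv'
            rcases List.mem_cons.mp hp with rfl | hp
            · rw [hget2] at hv'; cases hv'; rfl
            · exact hc p hp v' hv'
        · rintro ⟨hf, hc⟩
          exact ⟨fun p hp q hq hpq => hf p (List.mem_cons_of_mem _ hp) q (List.mem_cons_of_mem _ hq) hpq,
                 fun p hp v' hv' => hc p (List.mem_cons_of_mem _ hp) v' hv'⟩
      · have hred : canConvertLoop ((c1, c2) :: rest) d = false := by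
          simp [canConvertLoop, hget, hvc]
        rw [hred]
        simp only [Bool.false_eq_true, false_iff]
        rintro ⟨_, hc⟩
        exact hvc (hc (c1, c2) List.mem_cons_self v hget).symm

-- under the 128-bound, equal encodings squeezed between equal firsts force equal firsts
theorem pvEnc_squeeze (a b q : Char × Char)
    (hb2 : b.2.toNat < 128)
    (ha2 : a.2.toNat < 128) (hq2 : q.2.toNat < 128)
    (h1 : pvEnc a ≤ pvEnc b) (h2 : pvEnc b ≤ pvEnc q) (heq : a.1 = q.1) : b.1 = a.1 := by
  unfold pvEnc at h1 h2
  rw [heq] at h1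
  have : b.1.toNat = q.1.toNat := by omega
  rw [heq]
  exact Char.ext (UInt32.toNat_inj.mp this)

-- the adjacent scan on a pvEnc-sorted list of bounded pairs decides functionality
theorem adjAll_iff (l : List (Char × Char))
    (hd : ∀ p ∈ l, p.1.toNat < 128 ∧ p.2.toNat < 128)
    (hs : l.Pairwise (fun a b => pvEnc a ≤ pvEnc b)) :
    ((l.zip l.tail).all (fun pq => pq.1.1 != pq.2.1 || pq.1.2 == pq.2.2)) = true ↔
      PairsFunctional l := by
  induction l with
  | nil => simp [PairsFunctional]
  | cons a rest ih =>
    cases rest with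
    | nil =>
      simp only [List.tail_cons, List.zip_nil_right, List.all_nil, true_iff]
      intro p hp q hq _
      rcases List.mem_singleton.mp hp with rfl
      rcases List.mem_singleton.mp hq with rfl
      rfl
    | cons b rest' =>
      have hsr : (b :: rest').Pairwise (fun a b => pvEnc a ≤ pvEnc b) :=
        (List.pairwise_cons.mp hs).2
      have hdr : ∀ p ∈ b :: rest', p.1.toNat < 128 ∧ p.2.toNat < 128 :=
        fun p hp => hd p (List.mem_cons_of_mem _ hp)
      have hab : pvEnc a ≤ pvEnc b :=
        (List.pairwise_cons.mp hs).1 b List.mem_cons_self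
      have hzip : ((a :: b :: rest').zip (a :: b :: rest').tail) =
          (a, b) :: ((b :: rest').zip (b :: rest').tail) := by
        simp
      rw [hzip]
      simp only [List.all_cons, Bool.and_eq_true]
      rw [ih hdr hsr]
      constructor
      · rintro ⟨hck, hfr⟩
        -- head check: b.1 = a.1 → b.2 = a.2
        have hck' : b.1 = a.1 → b.2 = a.2 := by
          intro h
          by_cases h' : a.1 = b.1
          · simp only [bne, h', beq_self_eq_true, Bool.not_true, Bool.false_or,
              beq_iff_eq] at hck
            exact hck.symm
          · exact absurd h.symm h'
        intro p hp q hq hpq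
        rcases List.mem_cons.mp hp with rfl | hp2 <;> rcases List.mem_cons.mp hq with rfl | hq2
        · rfl
        · -- p head, q in rest
          have hbq : pvEnc b ≤ pvEnc q := by
            rcases List.mem_cons.mp hq2 with rfl | hq'
            · exact Nat.le_refl _
            · exact (List.pairwise_cons.mp hsr).1 q hq'
          have hb1 : b.1 = p.1 :=
            pvEnc_squeeze p b q (hdr b List.mem_cons_self).2
              (hd p List.mem_cons_self).2 (hdr q hq2).2 hab hbq hpq
          have hb2 : b.2 = p.2 := hck' hb1
          have : b.2 = q.2 := hfr b List.mem_cons_self q hq2 (by rw [hb1, hpq])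
          rw [← hb2, this]
        · -- q head, p in rest
          have hbp : pvEnc b ≤ pvEnc p := by
            rcases List.mem_cons.mp hp2 with rfl | hp'
            · exact Nat.le_refl _
            · exact (List.pairwise_cons.mp hsr).1 p hp'
          have hb1 : b.1 = q.1 :=
            pvEnc_squeeze q b p (hdr b List.mem_cons_self).2
              (hd q List.mem_cons_self).2 (hdr p hp2).2 hab hbp hpq.symm
          have hb2 : b.2 = q.2 := hck' hb1
          have : b.2 = p.2 := hfr b List.mem_cons_self p hp2 (by rw [hb1, ← hpq])
          rw [← this, hb2]
        · exact hfr p hp2 q hq2 hpq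
      · intro hf
        refine ⟨?_, ?_⟩
        · by_cases h' : a.1 = b.1
          · have := hf a List.mem_cons_self b (List.mem_cons_of_mem _ List.mem_cons_self) h'
            simp [bne, h', this]
          · simp [bne, h']
        · intro p hp q hq hpq
          exact hf p (List.mem_cons_of_mem _ hp) q (List.mem_cons_of_mem _ hq) hpq

theorem functional_sorted_iff (L : List (Char × Char)) :
    PairsFunctional (PySem.List.sorted L pvEnc false) ↔ PairsFunctional L := by
  unfold PairsFunctional
  constructor
  · intro h p hp q hq
    exact h p ((PySem.List.mem_sorted _ _ _ _).mpr hp) q ((PySem.List.mem_sorted _ _ _ _).mpr hq)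
  · intro h p hp q hq
    exact h p ((PySem.List.mem_sorted _ _ _ _).mp hp) q ((PySem.List.mem_sorted _ _ _ _).mp hq)

-- ===== VERDICT (by name: the statement is the Claim_ definition above) =====
theorem canConvert_spec : Claim_equal_canConvert := by
  intro str1 str2 hdom
  unfold Spec_canConvert canConvert canConvert_alt
  split
  · rfl
  · split
    · rfl
    · set L := str1.toList.zip str2.toList with hL
      simp only [PySem.List.slice_from_one]
      -- the domain bound on every zipped pair
      have hbnd : ∀ p ∈ L, p.1.toNat < 128 ∧ p.2.toNat < 128 := by
        intro p hp
        unfold Dom_canConvert pvDomStr at hdom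
        simp only [Bool.and_eq_true, List.all_eq_true] at hdom
        obtain ⟨h1, h2⟩ := hdom
        obtain ⟨hp1, hp2⟩ := List.of_mem_zip hp
        have b1 := h1 p.1 hp1
        have b2 := h2 p.2 hp2
        unfold pvDomChar at b1 b2
        simp only [Bool.or_eq_true, Bool.and_eq_true, decide_eq_true_eq, beq_iff_eq] at b1 b2
        omega
      have hbnd' : ∀ p ∈ PySem.List.sorted L pvEnc false, p.1.toNat < 128 ∧ p.2.toNat < 128 :=
        fun p hp => hbnd p ((PySem.List.mem_sorted _ _ _ _).mp hp)
      have hpw : (PySem.List.sorted L pvEnc false).Pairwise (fun a b => pvEnc a ≤ pvEnc b) :=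
        PySem.List.sorted_pairwise L pvEnc
      have h1 := canConvertLoop_eq_true_iff L PySem.Dict.empty
      simp only [PySem.Dict.get?_empty] at h1
      have h1' : canConvertLoop L PySem.Dict.empty = true ↔ PairsFunctional L := by
        rw [h1]; simp
      rw [Bool.eq_iff_iff, h1', adjAll_iff _ hbnd' hpw, functional_sorted_iff]
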